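-- pv_equiv track=rewrite | github.com/ETS-Next-Gen/AWE_SpellCorrect | awe_spellcorrect/spellCorrect.py | replaces
-- ===== SOURCE A (Python) =====
-- def replaces(word):
--     "All edits that are one replacement or involve \
--      simple letter doublings"
--     letters = \
--         'abcdefghijklmnopqrstuvwxyzABCDEF' \
--         + 'GHIJKLMNOPQRSTUVWXYZ0123456789''-'
--     splits = [(word[:i], word[i:])
--               for i in range(len(word) + 1)]
--     replaces = [L + c + R[1:]
--                 for L, R in splits
--                 if R for c in letters]
--     extra = [L + c + R
--              for L, R in splits
--              if R for c in letters
--              if len(L) > 0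
--              and (c == L[len(L) - 1]
--                   or (c == 't'
--                       and L[len(L) - 1] == 's'))]
--     return set(replaces + extra)
-- ===== SOURCE B (Python) =====
-- LETTERS = ('abcdefghijklmnopqrstuvwxyz'
--            'ABCDEFGHIJKLMNOPQRSTUVWXYZ'
--            '0123456789-')
--
--
-- def replaces(word):
--     "All edits that are one replacement or involve \
--      simple letter doublings"
--     def subs(pre, suf):
--         if not suf:
--             return []
--         return ([pre + c + suf[1:] for c in LETTERS]
--                 + subs(pre + suf[0], suf[1:]))
--
--     def dbls(pre, suf):
--         if not suf:
--             return []
--         here = []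
--         if pre and pre[-1] in LETTERS:
--             here.append(pre + pre[-1] + suf)
--             if pre[-1] == 's':
--                 here.append(pre + 't' + suf)
--         return here + dbls(pre + suf[0], suf[1:])
--
--     return set(subs('', word) + dbls('', word))
-- ===== Notes on version B (the rewrite author's own statement) =====
-- stated objective: simpler
-- what changed: A recursive left-to-right walk carrying the growing prefix replaces A's precomputed splits list and slice comprehensions, and the doubling edits come from directly testing the prefix's last character (emitting its doubling plus the t-edit when it is 's') instead of filtering the whole 63-letter alphabet at every split.
import Mathlib
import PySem

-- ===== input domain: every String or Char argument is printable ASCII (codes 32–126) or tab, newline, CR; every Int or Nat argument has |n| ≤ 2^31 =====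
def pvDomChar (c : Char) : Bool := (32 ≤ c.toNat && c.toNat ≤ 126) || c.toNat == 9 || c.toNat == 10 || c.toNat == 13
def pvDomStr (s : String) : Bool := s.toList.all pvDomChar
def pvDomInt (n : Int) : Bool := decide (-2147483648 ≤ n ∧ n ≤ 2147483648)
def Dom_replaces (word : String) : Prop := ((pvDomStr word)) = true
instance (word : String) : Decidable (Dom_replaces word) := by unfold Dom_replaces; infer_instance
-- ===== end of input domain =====

-- B rebuilds both edit families by a recursive left-to-right walk that carries the growing
-- prefix, testing the prefix's last character directly for the doubling edits instead of
-- building a splits list and filtering the whole alphabet at every split (objective: simpler).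

-- the letters alphabet both Pythons spell out literally
def pvLetters : List Char :=
  "abcdefghijklmnopqrstuvwxyzABCDEFGHIJKLMNOPQRSTUVWXYZ0123456789-".toList

-- ===== PORT A =====
def replaces (word : String) : List String :=
  let w := word.toList
  let splits := (PySem.List.pyRange 0 ((w.length : Int) + 1) 1).map
      (fun i => (PySem.List.slice w none (some i), PySem.List.slice w (some i) none))
  let reps := splits.flatMap (fun LR =>
      if LR.2 ≠ [] then
        pvLetters.map (fun c => String.ofList (LR.1 ++ c :: PySem.List.slice LR.2 (some 1) none))
      else [])
  let extra := splits.flatMap (fun LR =>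
      if LR.2 ≠ [] then
        (pvLetters.filter (fun c =>
            decide (0 < LR.1.length) &&
              (PySem.List.pyGetD LR.1 ((LR.1.length : Int) - 1) 'a' == c
               || (c == 't' && PySem.List.pyGetD LR.1 ((LR.1.length : Int) - 1) 'a' == 's')))).map
          (fun c => String.ofList (LR.1 ++ c :: LR.2))
      else [])
  PySem.Set.ofList (reps ++ extra)

-- ===== PORT B =====
-- recursive walk for the replacement edits: 'subs(pre, suf)' of Source B
def pvSubs (pre suf : List Char) : List String :=
  match suf with
  | [] => []
  | x :: rest =>
      pvLetters.map (fun c => String.ofList (pre ++ c :: rest)) ++ pvSubs (pre ++ [x]) rest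

-- recursive walk for the doubling edits: 'dbls(pre, suf)' of Source B
def pvDbls (pre suf : List Char) : List String :=
  match suf with
  | [] => []
  | x :: rest =>
      (if pre ≠ [] ∧ pvLetters.contains (PySem.List.pyGetD pre (-1) 'a') then
        String.ofList (pre ++ PySem.List.pyGetD pre (-1) 'a' :: (x :: rest)) ::
          (if PySem.List.pyGetD pre (-1) 'a' == 's' then
            [String.ofList (pre ++ 't' :: (x :: rest))]
          else [])
      else []) ++ pvDbls (pre ++ [x]) rest

def replaces_alt (word : String) : List String :=
  PySem.Set.ofList (pvSubs [] word.toList ++ pvDbls [] word.toList)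

-- ===== PRECONDITION & SPEC =====
def Spec_replaces (word : String) (out : List String) : Prop := out = replaces_alt word
instance (word : String) (out : List String) : Decidable (Spec_replaces word out) := by unfold Spec_replaces; infer_instance

-- ===== CLAIM (what is proved, stated in full; the proofs are below) =====
def Claim_equal_replaces : Prop := ∀ (word : String), Dom_replaces word → Spec_replaces word (replaces word)

-- ===== LEMMAS AND PROOFS =====

theorem filter_eq_singleton_of_nodup {α : Type} [DecidableEq α] (l : List α) (hl : l.Nodup) (x : α) :
    l.filter (fun c => x = c) = if x ∈ l then [x] else [] := by
  induction l with
  | nil => simp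
  | cons a t ih =>
    simp only [List.nodup_cons] at hl
    by_cases hx : x = a
    · subst hx
      simp [ih hl.2, hl.1]
    · simp [hx, ih hl.2]

theorem pvLetters_filter (x : Char) :
    pvLetters.filter (fun c => x == c || (c == 't' && x == 's'))
      = if pvLetters.contains x then x :: (if x == 's' then ['t'] else []) else [] := by
  by_cases hx : x = 's'
  · subst hx; decide
  · have hx' : (x == 's') = false := by simp [hx]
    simp only [hx', Bool.and_false, Bool.or_false, Bool.false_eq_true, if_false]
    have : pvLetters.filter (fun c => x = c) = if x ∈ pvLetters then [x] else [] := by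
      simpa using filter_eq_singleton_of_nodup pvLetters (by decide) x
    simpa [List.contains_iff_mem] using this

-- the per-boundary doubling edits, as a function of the split (prefix, suffix)
def gD (P S : List Char) : List String :=
  if P ≠ [] ∧ pvLetters.contains (PySem.List.pyGetD P (-1) 'a') then
    String.ofList (P ++ PySem.List.pyGetD P (-1) 'a' :: S) ::
      (if PySem.List.pyGetD P (-1) 'a' == 's' then [String.ofList (P ++ 't' :: S)] else [])
  else []

theorem pvSubs_eq (suf : List Char) : ∀ pre,
    pvSubs pre suf = (List.range suf.length).flatMap
      (fun k => pvLetters.map (fun c =>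
        String.ofList (pre ++ (suf.take k ++ c :: suf.drop (k + 1))))) := by
  induction suf with
  | nil => intro pre; simp [pvSubs]
  | cons x rest ih =>
    intro pre
    rw [pvSubs, List.length_cons, List.range_succ_eq_map, List.flatMap_cons, List.flatMap_map,
      ih (pre ++ [x])]
    simp [List.append_assoc]

theorem pvDbls_eq (suf : List Char) : ∀ pre,
    pvDbls pre suf = (List.range suf.length).flatMap
      (fun k => gD (pre ++ suf.take k) (suf.drop k)) := by
  induction suf with
  | nil => intro pre; simp [pvDbls]
  | cons x rest ih =>
    intro rest
    rw [pvDbls, List.length_cons, List.range_succ_eq_map, List.flatMap_cons, List.flatMap_map,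
      ih]
    simp [gD, List.append_assoc]

theorem getD_take_eq (w : List Char) (k : Nat) (h1 : 0 < k) (h2 : k ≤ w.length) :
    PySem.List.pyGetD (w.take k) (-1) 'a' = w.getD (k - 1) 'a' := by
  have hl : (w.take k).length = k := by simp [List.length_take]; omega
  rw [PySem.List.pyGetD_neg_ofNat (w.take k) 1 'a' (by omega) (by omega)]
  rw [← List.getD_eq_getElem (w.take k) 'a', hl]
  simp [List.getD, show k - 1 < k by omega]

theorem replaces_spec_aux (w : List Char) :
    replaces (String.ofList w) = replaces_alt (String.ofList w) := by
  simp only [replaces, replaces_alt, String.toList_ofList]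
  rw [pvSubs_eq, pvDbls_eq]
  refine congrArg _ (congrArg₂ (· ++ ·) ?_ ?_)
  · -- A's replacement comprehension = B's recursive subs
    rw [List.flatMap_map, PySem.List.pyRange_one]
    rw [List.flatMap_map]
    have e1 : ((w.length : Int) + 1 - 0).toNat = w.length + 1 := by omega
    rw [e1, List.range_succ, List.flatMap_append]
    simp only [zero_add, PySem.List.slice_from_natCast, PySem.List.slice_to_natCast,
      PySem.List.slice_from_one, List.tail_drop]
    simp only [List.flatMap_cons, List.flatMap_nil, List.drop_length, ne_eq, not_true_eq_false,
      if_neg, List.append_nil, List.nil_append, not_false_eq_true]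
    apply List.flatMap_congr
    intro k hk
    simp only [List.mem_range] at hk
    have hne : w.drop k ≠ [] := by simp only [ne_eq, List.drop_eq_nil_iff]; omega
    simp [hne]
  · -- A's extra comprehension = B's recursive dbls
    rw [List.flatMap_map, PySem.List.pyRange_one, List.flatMap_map]
    have e1 : ((w.length : Int) + 1 - 0).toNat = w.length + 1 := by omega
    rw [e1, List.range_succ, List.flatMap_append]
    simp only [zero_add, PySem.List.slice_from_natCast, PySem.List.slice_to_natCast]
    simp only [List.flatMap_cons, List.flatMap_nil, List.drop_length, ne_eq, not_true_eq_false,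
      if_neg, List.append_nil, not_false_eq_true]
    apply List.flatMap_congr
    intro k hk
    simp only [List.mem_range] at hk
    have hne : w.drop k ≠ [] := by simp only [ne_eq, List.drop_eq_nil_iff]; omega
    simp only [hne, not_false_eq_true, if_pos, List.nil_append]
    rcases Nat.eq_zero_or_pos k with hk0 | hkpos
    · subst hk0; simp [gD]
    · have hlen : (w.take k).length = k := by simp [List.length_take]; omega
      have htne : w.take k ≠ [] := by
        rw [← List.length_pos_iff, hlen]; exact hkpos
      have hc : ((k : Nat) : Int) - 1 = ((k - 1 : Nat) : Int) := by omega
      have hgd : PySem.List.pyGetD (w.take k) (((w.take k).length : Int) - 1) 'a'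
          = w.getD (k - 1) 'a' := by
        rw [hlen, hc, PySem.List.pyGetD_natCast]
        simp [List.getD, show k - 1 < k by omega]
      rw [gD, getD_take_eq w k hkpos (Nat.le_of_lt hk), hgd]
      simp only [hlen, hkpos, decide_true, Bool.true_and]
      rw [pvLetters_filter]
      simp only [List.getD_eq_getElem?_getD]
      by_cases h1 : w[k - 1]?.getD 'a' ∈ pvLetters <;>
        by_cases h2 : w[k - 1]?.getD 'a' = 's' <;>
          simp [h1, h2, htne, show ('s' ∈ pvLetters) from by decide]

-- ===== VERDICT (by name: the statement is the Claim_ definition above) =====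
theorem replaces_spec : Claim_equal_replaces := by
  intro word _
  unfold Spec_replaces
  have h := replaces_spec_aux word.toList
  rwa [String.ofList_toList] at h
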